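-- pv_equiv track=rewrite | github.com/salmon302/DSATrain | archive/development_utilities/migrate_unified_data.py | _infer_complexity_class
-- ===== SOURCE A (Python) =====
-- from typing import List, Dict, Any
--
-- def _infer_complexity_class(tags: List[str]) -> str:
--     """Infer complexity class from algorithm tags"""
--     if not tags:
--         return 'polynomial'
--
--     # Check for specific algorithm patterns
--     exponential_patterns = ['backtracking', 'brute_force', 'exhaustive_search']
--     logarithmic_patterns = ['binary_search', 'divide_and_conquer']
--     linear_patterns = ['two_pointers', 'sliding_window', 'greedy']
--
--     tags_lower = [tag.lower() for tag in tags]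
--
--     for pattern in exponential_patterns:
--         if any(pattern in tag for tag in tags_lower):
--             return 'exponential'
--
--     for pattern in logarithmic_patterns:
--         if any(pattern in tag for tag in tags_lower):
--             return 'logarithmic'
--
--     for pattern in linear_patterns:
--         if any(pattern in tag for tag in tags_lower):
--             return 'linear'
--
--     return 'polynomial'
-- ===== SOURCE B (Python) =====
-- def _infer_complexity_class(tags):
--     """Infer complexity class from algorithm tags"""
--     if not tags:
--         return 'polynomial'
--     tiers = [
--         ('exponential', ['backtracking', 'brute_force', 'exhaustive_search']),
--         ('logarithmic', ['binary_search', 'divide_and_conquer']),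
--         ('linear', ['two_pointers', 'sliding_window', 'greedy']),
--     ]
--     found = set()
--     for tag in tags:
--         t = tag.lower()
--         for cls, pats in tiers:
--             if any(p in t for p in pats):
--                 found.add(cls)
--     for cls, _ in tiers:
--         if cls in found:
--             return cls
--     return 'polynomial'
-- ===== Notes on version B (the rewrite author's own statement) =====
-- stated objective: alternative
-- what changed: Replaced A's three tier-by-tier early-return scans over the pre-lowercased tag list with a single pass over the tags that collects every matching tier class into a set, followed by a selection pass over the ordered tiers
import Mathlib
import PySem

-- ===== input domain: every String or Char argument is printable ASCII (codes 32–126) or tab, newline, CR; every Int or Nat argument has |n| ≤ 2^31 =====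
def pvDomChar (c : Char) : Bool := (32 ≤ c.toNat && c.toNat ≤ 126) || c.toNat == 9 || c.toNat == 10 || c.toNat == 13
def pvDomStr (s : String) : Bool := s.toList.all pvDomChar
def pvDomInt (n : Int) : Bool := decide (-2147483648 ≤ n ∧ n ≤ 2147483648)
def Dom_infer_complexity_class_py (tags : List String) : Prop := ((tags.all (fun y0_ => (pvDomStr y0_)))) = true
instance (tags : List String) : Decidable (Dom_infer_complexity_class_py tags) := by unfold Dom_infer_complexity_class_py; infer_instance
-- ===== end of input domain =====

-- B replaces A's tier-by-tier early-return scans with one collect-pass into a set of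
-- matched classes followed by a selection pass over the ordered tiers (alternative decomposition).


-- ===== PORT A =====
def pvExpPats : List String := ["backtracking", "brute_force", "exhaustive_search"]
def pvLogPats : List String := ["binary_search", "divide_and_conquer"]
def pvLinPats : List String := ["two_pointers", "sliding_window", "greedy"]

-- 'for pattern in pats: if any(pattern in tag for tag in tags_lower): return cls' — the scan of one tier
def pvScanTier (pats : List String) (tagsLower : List String) : Bool :=
  pats.any (fun pattern => tagsLower.any (fun tag => PySem.Str.isIn pattern tag))

def infer_complexity_class_py (tags : List String) : String :=
  if tags = [] then "polynomial"
  else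
    let tagsLower := tags.map PySem.Str.lower
    if pvScanTier pvExpPats tagsLower then "exponential"
    else if pvScanTier pvLogPats tagsLower then "logarithmic"
    else if pvScanTier pvLinPats tagsLower then "linear"
    else "polynomial"

-- ===== PORT B =====
def pvTiers : List (String × List String) :=
  [("exponential", pvExpPats), ("logarithmic", pvLogPats), ("linear", pvLinPats)]

-- inner loop of the collect pass: add to 'found' every tier class with a pattern occurring in t
def pvCollect (found : PySem.Set String) (t : String) : PySem.Set String :=
  pvTiers.foldl
    (fun acc cp => if cp.2.any (fun p => PySem.Str.isIn p t) then PySem.Set.add acc cp.1 else acc)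
    found

def infer_complexity_class_py_alt (tags : List String) : String :=
  if tags = [] then "polynomial"
  else
    let found := tags.foldl (fun acc tag => pvCollect acc (PySem.Str.lower tag)) PySem.Set.empty
    match pvTiers.find? (fun cp => PySem.Set.contains found cp.1) with
    | some cp => cp.1
    | none => "polynomial"

-- ===== PRECONDITION & SPEC =====
def Spec_infer_complexity_class_py (tags : List String) (out : String) : Prop := out = infer_complexity_class_py_alt tags
instance (tags : List String) (out : String) : Decidable (Spec_infer_complexity_class_py tags out) := by unfold Spec_infer_complexity_class_py; infer_instance

-- ===== CLAIM (what is proved, stated in full; the proofs are below) =====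
def Claim_equal_infer_complexity_class_py : Prop := ∀ (tags : List String), Dom_infer_complexity_class_py tags → Spec_infer_complexity_class_py tags (infer_complexity_class_py tags)

-- ===== LEMMAS AND PROOFS =====

-- contains after the inner collect loop, for each tier class
theorem pv_collect_contains (found : PySem.Set String) (t c : String) (pats : List String)
    (hc : (c, pats) ∈ pvTiers) :
    PySem.Set.contains (pvCollect found t) c
      = (pats.any (fun p => PySem.Str.isIn p t) || PySem.Set.contains found c) := by
  fin_cases hc <;>
    simp only [pvCollect, pvTiers, List.foldl] <;>
    split_ifs <;>
    simp_all [pvExpPats, pvLogPats, pvLinPats]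

-- contains after the whole collect pass
theorem pv_fold_contains (tags : List String) (found : PySem.Set String) (c : String)
    (pats : List String) (hc : (c, pats) ∈ pvTiers) :
    PySem.Set.contains (tags.foldl (fun acc tag => pvCollect acc (PySem.Str.lower tag)) found) c
      = (tags.any (fun tag => pats.any (fun p => PySem.Str.isIn p (PySem.Str.lower tag)))
          || PySem.Set.contains found c) := by
  induction tags generalizing found with
  | nil => simp
  | cons hd tl ih =>
    simp only [List.foldl_cons, List.any_cons, ih, pv_collect_contains _ _ _ _ hc]
    cases pats.any (fun p => PySem.Str.isIn p (PySem.Str.lower hd)) <;> simp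

-- a tier's scan over the pre-lowercased list equals B's per-tag match condition
theorem pv_scan_eq (pats tags : List String) :
    pvScanTier pats (tags.map PySem.Str.lower)
      = tags.any (fun tag => pats.any (fun p => PySem.Str.isIn p (PySem.Str.lower tag))) := by
  rw [Bool.eq_iff_iff]
  simp only [pvScanTier, List.any_eq_true, List.mem_map]
  constructor
  · rintro ⟨p, hp, t, ⟨tag, htag, rfl⟩, h⟩; exact ⟨tag, htag, p, hp, h⟩
  · rintro ⟨tag, htag, p, hp, h⟩; exact ⟨p, hp, _, ⟨tag, htag, rfl⟩, h⟩

-- ===== VERDICT (by name: the statement is the Claim_ definition above) =====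
theorem infer_complexity_class_py_spec : Claim_equal_infer_complexity_class_py := by
  intro tags _
  unfold Spec_infer_complexity_class_py infer_complexity_class_py infer_complexity_class_py_alt
  by_cases h : tags = []
  · simp [h]
  · simp only [if_neg h]
    have he := pv_fold_contains tags PySem.Set.empty "exponential" pvExpPats (by simp [pvTiers])
    have hl := pv_fold_contains tags PySem.Set.empty "logarithmic" pvLogPats (by simp [pvTiers])
    have hn := pv_fold_contains tags PySem.Set.empty "linear" pvLinPats (by simp [pvTiers])
    have hempty : ∀ c : String, PySem.Set.contains PySem.Set.empty c = false := fun c => rfl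
    rw [hempty, Bool.or_false] at he hl hn
    simp only [pvTiers, List.find?]
    rw [he, hl, hn, pv_scan_eq, pv_scan_eq, pv_scan_eq]
    cases tags.any (fun tag => pvExpPats.any (fun p => PySem.Str.isIn p (PySem.Str.lower tag))) <;>
    cases tags.any (fun tag => pvLogPats.any (fun p => PySem.Str.isIn p (PySem.Str.lower tag))) <;>
    cases tags.any (fun tag => pvLinPats.any (fun p => PySem.Str.isIn p (PySem.Str.lower tag))) <;>
      simp
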